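-- pv_equiv track=rewrite | github.com/candychiang/line-pricing-bot | app.py | find_best_truck_plt
-- ===== SOURCE A (Python) =====
-- import math
--
-- TRUCK_TYPES = [
--     {"name": "0.6T", "length": 170, "width": 125, "height": 125, "max_kg": 500},
--     {"name": "1.5T", "length": 300, "width": 150, "height": 150, "max_kg": 1200},
--     {"name": "3.5T", "length": 400, "width": 180, "height": 180, "max_kg": 2000},
--     {"name": "4.5T", "length": 450, "width": 180, "height": 180, "max_kg": 3000},
--     {"name": "8.8T", "length": 480, "width": 195, "height": 195, "max_kg": 5000},
--     {"name": "12T",  "length": 730, "width": 230, "height": 230, "max_kg": 6000},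
--     {"name": "15T",  "length": 760, "width": 240, "height": 240, "max_kg": 7500},
-- ]
--
-- PLT_GAP = 7    # 棧板間距及牆壁（cm）
--
-- HEIGHT_GAP = 7 # 疊放頭部空間（cm）
--
-- def can_fit_plt_arrangement(rows, cols, item_l, item_w, truck_l, truck_w):
--     """棧板排列：含7cm間距"""
--     needed_l = item_l * rows + PLT_GAP * (rows + 1)
--     needed_w = item_w * cols + PLT_GAP * (cols + 1)
--     return needed_l <= truck_l and needed_w <= truck_w
--
-- def find_best_truck_plt(count, item_l, item_w, item_h, total_kg, user_can_stack, is_express):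
--     """
--     棧板選車：
--     - 單件：不考慮疊放，只看尺寸+重量
--     - 多件+專車+可疊：件高×2+7≤車斗高才疊，件數減半
--     - 多件+專車+不可疊：全部平放
--     - 多件+併車：只看重量（不考慮尺寸排列）
--     """
--     for truck in TRUCK_TYPES:
--         tl, tw, th, tkg = truck["length"], truck["width"], truck["height"], truck["max_kg"]
--         if total_kg > tkg:
--             continue
--
--         if count == 1:
--             # 單件：直接看尺寸
--             actually_stackable = False
--             orientations = [(item_l, item_w), (item_w, item_l)] if item_l != item_w else [(item_l, item_w)]
--             fitted = any(
--                 ol + PLT_GAP * 2 <= tl and ow + PLT_GAP * 2 <= tw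
--                 for ol, ow in orientations
--             )
--         elif not is_express:
--             # 多件併車：只看重量
--             actually_stackable = user_can_stack
--             fitted = True
--         else:
--             # 多件專車
--             actually_stackable = user_can_stack and (item_h * 2 + HEIGHT_GAP <= th)
--             effective_count = math.ceil(count / 2) if actually_stackable else count
--             fitted = False
--             orientations = [(item_l, item_w), (item_w, item_l)] if item_l != item_w else [(item_l, item_w)]
--             for ol, ow in orientations:
--                 for rows in range(1, effective_count + 1):
--                     cols = math.ceil(effective_count / rows)
--                     if rows * cols < effective_count:
--                         continue
--                     if can_fit_plt_arrangement(rows, cols, ol, ow, tl, tw) or \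
--                        can_fit_plt_arrangement(cols, rows, ol, ow, tl, tw):
--                         fitted = True
--                         break
--                 if fitted:
--                     break
--
--         if fitted:
--             return truck["name"], actually_stackable
--
--     return None, False
-- ===== SOURCE B (Python) =====
-- # B: replaces A's O(count) row-by-row arrangement search with a closed-form
-- # floor-division capacity check per truck (O(1) overall).
-- TRUCKS = [
--     ("0.6T", 170, 125, 125, 500),
--     ("1.5T", 300, 150, 150, 1200),
--     ("3.5T", 400, 180, 180, 2000),
--     ("4.5T", 450, 180, 180, 3000),
--     ("8.8T", 480, 195, 195, 5000),
--     ("12T",  730, 230, 230, 6000),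
--     ("15T",  760, 240, 240, 7500),
-- ]
--
-- PLT_GAP = 7
-- HEIGHT_GAP = 7
--
--
-- def max_plts(item_dim, truck_dim, limit):
--     """Most pallets of size item_dim (plus 7cm gaps incl. walls) along truck_dim,
--     capped at limit (never need more than limit in a line)."""
--     footprint = item_dim + PLT_GAP
--     if footprint <= 0:
--         return limit  # degenerate pallet: any number fits
--     return max(0, min(limit, (truck_dim - PLT_GAP) // footprint))
--
--
-- def find_best_truck_plt(count, item_l, item_w, item_h, total_kg, user_can_stack, is_express):
--     for name, tl, tw, th, tkg in TRUCKS: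
--         if total_kg > tkg:
--             continue
--         if count == 1:
--             stack = False
--             fitted = (item_l + 2 * PLT_GAP <= tl and item_w + 2 * PLT_GAP <= tw) or \
--                      (item_w + 2 * PLT_GAP <= tl and item_l + 2 * PLT_GAP <= tw)
--         elif not is_express:
--             stack = user_can_stack
--             fitted = True
--         else:
--             stack = user_can_stack and item_h * 2 + HEIGHT_GAP <= th
--             eff = -(-count // 2) if stack else count
--             fitted = (max_plts(item_l, tl, eff) * max_plts(item_w, tw, eff) >= eff or
--                       max_plts(item_w, tl, eff) * max_plts(item_l, tw, eff) >= eff)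
--         if fitted:
--             return name, stack
--     return None, False
-- ===== Notes on version B (the rewrite author's own statement) =====
-- stated objective: faster
-- what changed: B replaces A's per-truck row-by-row arrangement search over range(1, effective_count+1) with a closed-form floor-division capacity check (max pallets per axis, product compared to the count), making the whole selection O(1) instead of O(count).
-- intended difference: On express orders with count <= 0 and total_kg <= 7500, A's row search range(1, effective_count+1) is empty so A returns (None, False), while B returns the smallest truck satisfying the weight limit, which is the intended answer since zero pallets need no floor space. — e.g. on find_best_truck_plt(0, 50, 50, 50, 0, false, true): A returns (none, false), B returns (some "0.6T", false)
import Mathlib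
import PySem

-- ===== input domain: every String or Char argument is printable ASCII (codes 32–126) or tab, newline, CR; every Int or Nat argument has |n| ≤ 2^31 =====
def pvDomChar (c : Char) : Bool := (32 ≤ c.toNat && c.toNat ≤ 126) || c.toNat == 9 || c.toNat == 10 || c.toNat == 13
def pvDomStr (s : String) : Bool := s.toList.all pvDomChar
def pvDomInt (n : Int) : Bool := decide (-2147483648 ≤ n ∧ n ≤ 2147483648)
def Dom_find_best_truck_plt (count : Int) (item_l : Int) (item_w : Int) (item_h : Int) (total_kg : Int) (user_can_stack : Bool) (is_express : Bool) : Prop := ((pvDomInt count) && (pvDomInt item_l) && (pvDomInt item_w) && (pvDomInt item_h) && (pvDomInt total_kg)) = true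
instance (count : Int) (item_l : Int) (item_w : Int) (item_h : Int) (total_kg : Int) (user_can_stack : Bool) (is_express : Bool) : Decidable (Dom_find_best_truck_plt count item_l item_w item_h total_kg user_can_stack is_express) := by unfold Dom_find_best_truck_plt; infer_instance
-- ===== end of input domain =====

-- B replaces A's O(count) per-truck row search with a closed-form floor-division
-- capacity check; equivalence is about the return value (neither mutates anything).

-- ===== PORT A =====
-- trucks as (name, length, width, height, max_kg)
def pvTrucks : List (String × Int × Int × Int × Int) :=
  [("0.6T", 170, 125, 125, 500), ("1.5T", 300, 150, 150, 1200),
   ("3.5T", 400, 180, 180, 2000), ("4.5T", 450, 180, 180, 3000),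
   ("8.8T", 480, 195, 195, 5000), ("12T", 730, 230, 230, 6000),
   ("15T", 760, 240, 240, 7500)]

-- can_fit_plt_arrangement
def pvCanFit (rows cols item_l item_w truck_l truck_w : Int) : Bool :=
  decide (item_l * rows + 7 * (rows + 1) ≤ truck_l) &&
  decide (item_w * cols + 7 * (cols + 1) ≤ truck_w)

-- [(item_l, item_w), (item_w, item_l)] if item_l != item_w else [(item_l, item_w)]
def pvOrients (il iw : Int) : List (Int × Int) :=
  if il ≠ iw then [(il, iw), (iw, il)] else [(il, iw)]

-- math.ceil(a / b) for integers, 0 < b (exact: -((-a) // b))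
def pvCeil (a b : Int) : Int := -(PySem.Int.floordiv (-a) b)

-- A's doubly-nested arrangement search (express, multi-pallet case)
def pvFittedA (eff tl tw il iw : Int) : Bool :=
  (pvOrients il iw).any fun olow =>
    (PySem.List.pyRange 1 (eff + 1) 1).any fun rows =>
      let cols := pvCeil eff rows
      !(decide (rows * cols < eff)) &&
        (pvCanFit rows cols olow.1 olow.2 tl tw || pvCanFit cols rows olow.1 olow.2 tl tw)

-- the for-loop over TRUCK_TYPES with early return
def pvGoA (count il iw ih kg : Int) (ucs ex : Bool) :
    List (String × Int × Int × Int × Int) → Option String × Bool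
  | [] => (none, false)
  | (name, tl, tw, th, tkg) :: rest =>
    if kg > tkg then pvGoA count il iw ih kg ucs ex rest
    else
      let sf : Bool × Bool :=
        if count = 1 then
          (false, (pvOrients il iw).any fun olow =>
            decide (olow.1 + 7 * 2 ≤ tl) && decide (olow.2 + 7 * 2 ≤ tw))
        else if !ex then
          (ucs, true)
        else
          let st := ucs && decide (ih * 2 + 7 ≤ th)
          let eff := if st then pvCeil count 2 else count
          (st, pvFittedA eff tl tw il iw)
      if sf.2 then (some name, sf.1) else pvGoA count il iw ih kg ucs ex rest

def find_best_truck_plt (count : Int) (item_l : Int) (item_w : Int) (item_h : Int) (total_kg : Int) (user_can_stack : Bool) (is_express : Bool) : Option String × Bool :=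
  pvGoA count item_l item_w item_h total_kg user_can_stack is_express pvTrucks

-- ===== PORT B =====
-- max_plts: most pallets along one axis, capped at limit
def pvMaxPlts (itemDim truckDim limit : Int) : Int :=
  if itemDim + 7 ≤ 0 then limit
  else max 0 (min limit (PySem.Int.floordiv (truckDim - 7) (itemDim + 7)))

def pvGoB (count il iw ih kg : Int) (ucs ex : Bool) :
    List (String × Int × Int × Int × Int) → Option String × Bool
  | [] => (none, false)
  | (name, tl, tw, th, tkg) :: rest =>
    if kg > tkg then pvGoB count il iw ih kg ucs ex rest
    else
      let sf : Bool × Bool :=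
        if count = 1 then
          (false, (decide (il + 2 * 7 ≤ tl) && decide (iw + 2 * 7 ≤ tw)) ||
                  (decide (iw + 2 * 7 ≤ tl) && decide (il + 2 * 7 ≤ tw)))
        else if !ex then
          (ucs, true)
        else
          let st := ucs && decide (ih * 2 + 7 ≤ th)
          let eff := if st then pvCeil count 2 else count
          (st, decide (pvMaxPlts il tl eff * pvMaxPlts iw tw eff ≥ eff) ||
               decide (pvMaxPlts iw tl eff * pvMaxPlts il tw eff ≥ eff))
      if sf.2 then (some name, sf.1) else pvGoB count il iw ih kg ucs ex rest

def find_best_truck_plt_alt (count : Int) (item_l : Int) (item_w : Int) (item_h : Int) (total_kg : Int) (user_can_stack : Bool) (is_express : Bool) : Option String × Bool :=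
  pvGoB count item_l item_w item_h total_kg user_can_stack is_express pvTrucks

-- ===== PRECONDITION & SPEC =====
-- On express orders with count <= 0 and total_kg <= 7500, A's row search
-- range(1, effective_count+1) is empty so A returns (None, False); B returns the
-- smallest truck satisfying the weight limit, the intended answer (zero pallets
-- need no floor space).
def D_find_best_truck_plt (count : Int) (item_l : Int) (item_w : Int) (item_h : Int) (total_kg : Int) (user_can_stack : Bool) (is_express : Bool) : Prop :=
  count ≤ 0 ∧ is_express = true ∧ total_kg ≤ 7500
instance (count : Int) (item_l : Int) (item_w : Int) (item_h : Int) (total_kg : Int) (user_can_stack : Bool) (is_express : Bool) : Decidable (D_find_best_truck_plt count item_l item_w item_h total_kg user_can_stack is_express) := by unfold D_find_best_truck_plt; infer_instance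

def Spec_find_best_truck_plt (count : Int) (item_l : Int) (item_w : Int) (item_h : Int) (total_kg : Int) (user_can_stack : Bool) (is_express : Bool) (out : Option String × Bool) : Prop :=
  ¬ D_find_best_truck_plt count item_l item_w item_h total_kg user_can_stack is_express → out = find_best_truck_plt_alt count item_l item_w item_h total_kg user_can_stack is_express
instance (count : Int) (item_l : Int) (item_w : Int) (item_h : Int) (total_kg : Int) (user_can_stack : Bool) (is_express : Bool) (out : Option String × Bool) : Decidable (Spec_find_best_truck_plt count item_l item_w item_h total_kg user_can_stack is_express out) := by unfold Spec_find_best_truck_plt; infer_instance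

def pvDiffWitness_find_best_truck_plt : Int × Int × Int × Int × Int × Bool × Bool := (0, 50, 50, 50, 0, false, true)
def pvDiffWitnessOut_find_best_truck_plt : (Option String × Bool) × (Option String × Bool) := ((none, false), (some "0.6T", false))

-- ===== CLAIM (what is proved, stated in full; the proofs are below) =====
def Claim_unchanged_find_best_truck_plt : Prop := ∀ (count : Int) (item_l : Int) (item_w : Int) (item_h : Int) (total_kg : Int) (user_can_stack : Bool) (is_express : Bool), Dom_find_best_truck_plt count item_l item_w item_h total_kg user_can_stack is_express → Spec_find_best_truck_plt count item_l item_w item_h total_kg user_can_stack is_express (find_best_truck_plt count item_l item_w item_h total_kg user_can_stack is_express)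
def Claim_changed_find_best_truck_plt : Prop := Dom_find_best_truck_plt (pvDiffWitness_find_best_truck_plt.1) (pvDiffWitness_find_best_truck_plt.2.1) (pvDiffWitness_find_best_truck_plt.2.2.1) (pvDiffWitness_find_best_truck_plt.2.2.2.1) (pvDiffWitness_find_best_truck_plt.2.2.2.2.1) (pvDiffWitness_find_best_truck_plt.2.2.2.2.2.1) (pvDiffWitness_find_best_truck_plt.2.2.2.2.2.2) ∧ D_find_best_truck_plt (pvDiffWitness_find_best_truck_plt.1) (pvDiffWitness_find_best_truck_plt.2.1) (pvDiffWitness_find_best_truck_plt.2.2.1) (pvDiffWitness_find_best_truck_plt.2.2.2.1) (pvDiffWitness_find_best_truck_plt.2.2.2.2.1) (pvDiffWitness_find_best_truck_plt.2.2.2.2.2.1) (pvDiffWitness_find_best_truck_plt.2.2.2.2.2.2) ∧ find_best_truck_plt (pvDiffWitness_find_best_truck_plt.1) (pvDiffWitness_find_best_truck_plt.2.1) (pvDiffWitness_find_best_truck_plt.2.2.1) (pvDiffWitness_find_best_truck_plt.2.2.2.1) (pvDiffWitness_find_best_truck_plt.2.2.2.2.1) (pvDiffWitness_find_best_truck_plt.2.2.2.2.2.1)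 (pvDiffWitness_find_best_truck_plt.2.2.2.2.2.2) = pvDiffWitnessOut_find_best_truck_plt.1 ∧ find_best_truck_plt_alt (pvDiffWitness_find_best_truck_plt.1) (pvDiffWitness_find_best_truck_plt.2.1) (pvDiffWitness_find_best_truck_plt.2.2.1) (pvDiffWitness_find_best_truck_plt.2.2.2.1) (pvDiffWitness_find_best_truck_plt.2.2.2.2.1) (pvDiffWitness_find_best_truck_plt.2.2.2.2.2.1) (pvDiffWitness_find_best_truck_plt.2.2.2.2.2.2) = pvDiffWitnessOut_find_best_truck_plt.2 ∧ pvDiffWitnessOut_find_best_truck_plt.1 ≠ pvDiffWitnessOut_find_best_truck_plt.2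
def Claim_exact_find_best_truck_plt : Prop := ∀ (count : Int) (item_l : Int) (item_w : Int) (item_h : Int) (total_kg : Int) (user_can_stack : Bool) (is_express : Bool), Dom_find_best_truck_plt count item_l item_w item_h total_kg user_can_stack is_express → D_find_best_truck_plt count item_l item_w item_h total_kg user_can_stack is_express → find_best_truck_plt count item_l item_w item_h total_kg user_can_stack is_express ≠ find_best_truck_plt_alt count item_l item_w item_h total_kg user_can_stack is_express

-- ===== LEMMAS AND PROOFS =====

-- ceiling characterization: pvCeil a b is the least q with a ≤ q * b (0 < b)
theorem pvCeil_spec (a b : Int) (hb : 0 < b) :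
    (pvCeil a b - 1) * b < a ∧ a ≤ pvCeil a b * b :=
  (PySem.Int.neg_floordiv_neg_eq_iff_of_pos hb).mp rfl

-- one row/column fit is monotone downwards (truck dim ≥ 7)
theorem pvFits_mono {x d k r : Int} (hd : 7 ≤ d) (hk : 1 ≤ k) (hkr : k ≤ r)
    (h : x * r + 7 * (r + 1) ≤ d) : x * k + 7 * (k + 1) ≤ d := by
  by_cases h7 : 0 ≤ x + 7 <;> nlinarith

theorem pvMaxPlts_nonneg {x d l : Int} (hl : 0 ≤ l) : 0 ≤ pvMaxPlts x d l := by
  unfold pvMaxPlts; split_ifs with h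
  · exact hl
  · exact le_max_left _ _

-- the closed-form capacity really fits in the truck
theorem pvMaxPlts_fits {x d eff : Int} (hd : 7 ≤ d) (hM : 1 ≤ pvMaxPlts x d eff) :
    x * pvMaxPlts x d eff + 7 * (pvMaxPlts x d eff + 1) ≤ d := by
  set M := pvMaxPlts x d eff with hMdef
  rw [pvMaxPlts] at hMdef
  split_ifs at hMdef with h
  · nlinarith
  · push_neg at h
    have hb : 0 < x + 7 := h
    have hq0 : 0 ≤ PySem.Int.floordiv (d - 7) (x + 7) :=
      (PySem.Int.le_floordiv_iff_mul_le hb).mpr (by nlinarith)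
    have hMq : M ≤ PySem.Int.floordiv (d - 7) (x + 7) := by
      rw [hMdef]; exact max_le hq0 (min_le_right _ _)
    have hqd : PySem.Int.floordiv (d - 7) (x + 7) * (x + 7) ≤ d - 7 :=
      (PySem.Int.le_floordiv_iff_mul_le hb).mp (le_refl _)
    nlinarith

-- any fitting row count, capped at the limit, is below the closed-form capacity
theorem le_pvMaxPlts {x d eff r : Int} (heff : 1 ≤ eff) (hr : 1 ≤ r)
    (h : x * r + 7 * (r + 1) ≤ d) : min r eff ≤ pvMaxPlts x d eff := by
  unfold pvMaxPlts
  split_ifs with hf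
  · exact min_le_right r eff
  · push_neg at hf
    have hr' : r ≤ PySem.Int.floordiv (d - 7) (x + 7) := by
      rw [PySem.Int.le_floordiv_iff_mul_le hf]; nlinarith
    refine le_trans ?_ (le_max_right _ _)
    rcases le_total r eff with h1 | h1 <;> simp [min_def] <;> omega

-- existence of a fitting arrangement ⟺ closed-form product bound (eff ≥ 1)
theorem pvProd_iff {x y tl tw eff : Int} (htl : 7 ≤ tl) (htw : 7 ≤ tw) (heff : 1 ≤ eff) :
    (∃ r c : Int, 1 ≤ r ∧ 1 ≤ c ∧ eff ≤ r * c ∧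
      x * r + 7 * (r + 1) ≤ tl ∧ y * c + 7 * (c + 1) ≤ tw) ↔
    eff ≤ pvMaxPlts x tl eff * pvMaxPlts y tw eff := by
  constructor
  · rintro ⟨r, c, hr, hc, hrc, hfx, hfy⟩
    have hMr : min r eff ≤ pvMaxPlts x tl eff := le_pvMaxPlts heff hr hfx
    have hNc : min c eff ≤ pvMaxPlts y tw eff := le_pvMaxPlts heff hc hfy
    have h1 : 1 ≤ min r eff := le_min hr heff
    have h2 : 1 ≤ min c eff := le_min hc heff
    have key : eff ≤ min r eff * min c eff := by
      rcases le_total r eff with h | h <;> rcases le_total c eff with h' | h' <;>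
        simp [min_def, h, h'] <;> nlinarith
    calc eff ≤ min r eff * min c eff := key
      _ ≤ pvMaxPlts x tl eff * pvMaxPlts y tw eff :=
          mul_le_mul hMr hNc (by omega) (by omega)
  · intro h
    have hM0 : 0 ≤ pvMaxPlts x tl eff := pvMaxPlts_nonneg (by omega)
    have hN0 : 0 ≤ pvMaxPlts y tw eff := pvMaxPlts_nonneg (by omega)
    have hM1 : 1 ≤ pvMaxPlts x tl eff := by nlinarith
    have hN1 : 1 ≤ pvMaxPlts y tw eff := by nlinarith
    exact ⟨pvMaxPlts x tl eff, pvMaxPlts y tw eff, hM1, hN1, h,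
      pvMaxPlts_fits htl hM1, pvMaxPlts_fits htw hN1⟩

-- A's row search ⟺ existence of a fitting arrangement, per orientation (eff ≥ 1)
theorem pvSearch_iff {x y tl tw eff : Int} (htl : 7 ≤ tl) (htw : 7 ≤ tw) (heff : 1 ≤ eff) :
    ((PySem.List.pyRange 1 (eff + 1) 1).any fun rows =>
      let cols := pvCeil eff rows
      !(decide (rows * cols < eff)) &&
        (pvCanFit rows cols x y tl tw || pvCanFit cols rows x y tl tw)) = true ↔
    (∃ r c : Int, 1 ≤ r ∧ 1 ≤ c ∧ eff ≤ r * c ∧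
      x * r + 7 * (r + 1) ≤ tl ∧ y * c + 7 * (c + 1) ≤ tw) := by
  rw [List.any_eq_true]
  constructor
  · rintro ⟨rows, hmem, hf⟩
    rw [PySem.List.mem_pyRange_one] at hmem
    obtain ⟨hlt, hub⟩ := pvCeil_spec eff rows (by omega)
    simp only [pvCanFit, Bool.and_eq_true, Bool.or_eq_true, Bool.not_eq_eq_eq_not,
      Bool.not_true, decide_eq_false_iff_not, decide_eq_true_eq, not_lt] at hf
    have hcols1 : 1 ≤ pvCeil eff rows := by nlinarith
    rcases hf.2 with ⟨h1, h2⟩ | ⟨h1, h2⟩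
    · exact ⟨rows, pvCeil eff rows, by omega, hcols1, by nlinarith, h1, h2⟩
    · exact ⟨pvCeil eff rows, rows, hcols1, by omega, by nlinarith, h1, h2⟩
  · rintro ⟨r, c, hr, hc, hrc, hfx, hfy⟩
    have hrows1 : 1 ≤ min r eff := le_min hr heff
    have hrowse : min r eff ≤ eff := min_le_right r eff
    obtain ⟨hlt, hub⟩ := pvCeil_spec eff (min r eff) (by omega)
    have hcols1 : 1 ≤ pvCeil eff (min r eff) := by nlinarith
    have hcolsc : pvCeil eff (min r eff) ≤ c := by
      by_contra hcc
      push_neg at hcc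
      rcases le_total r eff with h | h
      · rw [min_eq_left h] at hlt hcc
        nlinarith [mul_le_mul_of_nonneg_right (show c ≤ pvCeil eff r - 1 by omega)
          (show (0:ℤ) ≤ r by omega)]
      · rw [min_eq_right h] at hlt hcc
        nlinarith [mul_le_mul_of_nonneg_right (show (1:ℤ) ≤ pvCeil eff eff - 1 by omega)
          (show (0:ℤ) ≤ eff by omega)]
    refine ⟨min r eff, ?_, ?_⟩
    · rw [PySem.List.mem_pyRange_one]; omega
    · simp only [pvCanFit, Bool.and_eq_true, Bool.or_eq_true, Bool.not_eq_eq_eq_not,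
        Bool.not_true, decide_eq_false_iff_not, decide_eq_true_eq, not_lt]
      refine ⟨by nlinarith, Or.inl ⟨?_, ?_⟩⟩
      · exact pvFits_mono htl hrows1 (min_le_left r eff) hfx
      · exact pvFits_mono htw hcols1 hcolsc hfy

-- one orientation of A's search = one closed-form check
theorem pvInner_eq {x y tl tw eff : Int} (htl : 7 ≤ tl) (htw : 7 ≤ tw) (heff : 1 ≤ eff) :
    ((PySem.List.pyRange 1 (eff + 1) 1).any fun rows =>
      let cols := pvCeil eff rows
      !(decide (rows * cols < eff)) &&
        (pvCanFit rows cols x y tl tw || pvCanFit cols rows x y tl tw)) =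
    decide (pvMaxPlts x tl eff * pvMaxPlts y tw eff ≥ eff) := by
  by_cases hP : eff ≤ pvMaxPlts x tl eff * pvMaxPlts y tw eff
  · rw [(pvSearch_iff htl htw heff).mpr ((pvProd_iff htl htw heff).mpr hP)]
    simp [ge_iff_le, hP]
  · have hne : ¬ ((PySem.List.pyRange 1 (eff + 1) 1).any fun rows =>
        let cols := pvCeil eff rows
        !(decide (rows * cols < eff)) &&
          (pvCanFit rows cols x y tl tw || pvCanFit cols rows x y tl tw)) = true :=
      fun h => hP ((pvProd_iff htl htw heff).mp ((pvSearch_iff htl htw heff).mp h))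
    rw [Bool.not_eq_true] at hne
    rw [hne]
    simp [ge_iff_le, hP]

-- A's express fitted flag = B's express fitted flag (eff ≥ 1, truck dims ≥ 7)
theorem pvFitted_eq {il iw tl tw eff : Int} (htl : 7 ≤ tl) (htw : 7 ≤ tw) (heff : 1 ≤ eff) :
    pvFittedA eff tl tw il iw =
      (decide (pvMaxPlts il tl eff * pvMaxPlts iw tw eff ≥ eff) ||
       decide (pvMaxPlts iw tl eff * pvMaxPlts il tw eff ≥ eff)) := by
  unfold pvFittedA pvOrients
  by_cases hil : il = iw
  · subst hil
    simp only [ne_eq, not_true_eq_false, if_false, List.any_cons, List.any_nil, Bool.or_false]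
    rw [pvInner_eq htl htw heff, Bool.or_self]
  · simp only [ne_eq, hil, not_false_eq_true, if_true, List.any_cons, List.any_nil, Bool.or_false]
    rw [pvInner_eq htl htw heff, pvInner_eq htl htw heff]

-- the two single-pallet checks agree
theorem pvSingle_eq (il iw tl tw : Int) :
    ((pvOrients il iw).any fun olow =>
      decide (olow.1 + 7 * 2 ≤ tl) && decide (olow.2 + 7 * 2 ≤ tw)) =
    ((decide (il + 2 * 7 ≤ tl) && decide (iw + 2 * 7 ≤ tw)) ||
     (decide (iw + 2 * 7 ≤ tl) && decide (il + 2 * 7 ≤ tw))) := by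
  unfold pvOrients
  rw [Bool.eq_iff_iff]
  by_cases hil : il = iw <;>
    simp [hil, List.any_cons, Bool.and_eq_true, Bool.or_eq_true, decide_eq_true_eq]

-- effective count is positive when count ≥ 2
theorem pvEff_pos {count : Int} (hc : 2 ≤ count) (st : Bool) :
    1 ≤ (if st then pvCeil count 2 else count) := by
  obtain ⟨h1, h2⟩ := pvCeil_spec count 2 (by omega)
  split_ifs <;> omega

-- effective count stays nonpositive when count ≤ 0
theorem pvEff_nonpos {count : Int} (hc : count ≤ 0) (st : Bool) :
    (if st then pvCeil count 2 else count) ≤ 0 := by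
  obtain ⟨h1, h2⟩ := pvCeil_spec count 2 (by omega)
  split_ifs <;> omega

-- the two loops agree truck by truck whenever no truck hits the empty-search corner
theorem pvGo_eq (count il iw ih kg : Int) (ucs ex : Bool)
    (hc : ex = false ∨ 1 ≤ count) (ts : List (String × Int × Int × Int × Int))
    (hts : ∀ t ∈ ts, 7 ≤ t.2.1 ∧ 7 ≤ t.2.2.1) :
    pvGoA count il iw ih kg ucs ex ts = pvGoB count il iw ih kg ucs ex ts := by
  induction ts with
  | nil => rfl
  | cons t rest ihl =>
    obtain ⟨name, tl, tw, th, tkg⟩ := t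
    obtain ⟨htl, htw⟩ := hts _ (List.mem_cons_self ..)
    have ihr := ihl (fun t ht => hts t (List.mem_cons_of_mem _ ht))
    simp only [pvGoA, pvGoB]
    by_cases hkg : kg > tkg
    · rw [if_pos hkg, if_pos hkg, ihr]
    · rw [if_neg hkg, if_neg hkg, ihr]
      by_cases hc1 : count = 1
      · simp only [hc1, if_pos, pvSingle_eq]
      · rw [if_neg hc1, if_neg hc1]
        cases ex with
        | false => rfl
        | true =>
          have hc2 : 2 ≤ count := by
            rcases hc with h | h
            · simp at h
            · omega
          simp only [Bool.not_true, Bool.false_eq_true, if_false]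
          rw [pvFitted_eq htl htw (pvEff_pos hc2 _)]

-- A finds nothing when count ≤ 0 on an express order: the row search is empty
theorem pvGoA_none (count il iw ih kg : Int) (ucs : Bool) (hc : count ≤ 0)
    (ts : List (String × Int × Int × Int × Int)) :
    pvGoA count il iw ih kg ucs true ts = (none, false) := by
  induction ts with
  | nil => rfl
  | cons t rest ihl =>
    obtain ⟨name, tl, tw, th, tkg⟩ := t
    simp only [pvGoA]
    by_cases hkg : kg > tkg
    · rw [if_pos hkg, ihl]
    · rw [if_neg hkg, if_neg (show ¬ count = 1 by omega)]
      have heff := pvEff_nonpos hc (ucs && decide (ih * 2 + 7 ≤ th))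
      have hfit : pvFittedA (if ucs && decide (ih * 2 + 7 ≤ th) then pvCeil count 2 else count)
          tl tw il iw = false := by
        unfold pvFittedA pvOrients
        rw [PySem.List.pyRange_one_eq_nil (by omega)]
        split_ifs <;> simp
      simp only [Bool.not_true, Bool.false_eq_true, if_false, hfit, ihl]

-- B picks the first weight-feasible truck when count ≤ 0 on an express order
theorem pvProd_of_nonpos {x y a b eff : Int} (hc : eff ≤ 0) :
    eff ≤ pvMaxPlts x a eff * pvMaxPlts y b eff := by
  unfold pvMaxPlts
  split_ifs with h1 h2 h2
  · nlinarith
  · rw [max_eq_left (le_trans (min_le_left _ _) hc), mul_zero]; exact hc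
  · rw [max_eq_left (le_trans (min_le_left _ _) hc), zero_mul]; exact hc
  · rw [max_eq_left (le_trans (min_le_left _ _) hc), zero_mul]; exact hc

theorem pvGoB_some (count il iw ih kg : Int) (ucs : Bool) (hc : count ≤ 0)
    (ts : List (String × Int × Int × Int × Int))
    (hts : ∃ t ∈ ts, kg ≤ t.2.2.2.2) :
    (pvGoB count il iw ih kg ucs true ts).1.isSome = true := by
  induction ts with
  | nil => simp at hts
  | cons t rest ihl =>
    obtain ⟨name, tl, tw, th, tkg⟩ := t
    simp only [pvGoB]
    by_cases hkg : kg > tkg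
    · rw [if_pos hkg]
      apply ihl
      obtain ⟨t', ht', hkg'⟩ := hts
      rcases List.mem_cons.mp ht' with rfl | hmem
      · exact absurd hkg' (by simpa using hkg)
      · exact ⟨t', hmem, hkg'⟩
    · rw [if_neg hkg, if_neg (show ¬ count = 1 by omega)]
      have heff := pvEff_nonpos hc (ucs && decide (ih * 2 + 7 ≤ th))
      have hfit : decide (pvMaxPlts il tl (if ucs && decide (ih * 2 + 7 ≤ th) then pvCeil count 2 else count) *
            pvMaxPlts iw tw (if ucs && decide (ih * 2 + 7 ≤ th) then pvCeil count 2 else count) ≥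
            (if ucs && decide (ih * 2 + 7 ≤ th) then pvCeil count 2 else count)) = true :=
        decide_eq_true_eq.mpr (pvProd_of_nonpos heff)
      simp only [Bool.not_true, Bool.false_eq_true, if_false, hfit, Bool.true_or, if_true]
      rfl

-- both loops skip every truck when the load is too heavy for all of them
theorem pvGo_heavy (count il iw ih kg : Int) (ucs ex : Bool)
    (ts : List (String × Int × Int × Int × Int)) (hts : ∀ t ∈ ts, t.2.2.2.2 < kg) :
    pvGoA count il iw ih kg ucs ex ts = (none, false) ∧
    pvGoB count il iw ih kg ucs ex ts = (none, false) := by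
  induction ts with
  | nil => exact ⟨rfl, rfl⟩
  | cons t rest ihl =>
    obtain ⟨name, tl, tw, th, tkg⟩ := t
    have h := hts _ (List.mem_cons_self ..)
    have ihr := ihl (fun t ht => hts t (List.mem_cons_of_mem _ ht))
    simp only [pvGoA, pvGoB]
    rw [if_pos (show kg > tkg from h), if_pos (show kg > tkg from h)]
    exact ihr

theorem pvTrucks_dims : ∀ t ∈ pvTrucks, 7 ≤ t.2.1 ∧ 7 ≤ t.2.2.1 := by decide

-- ===== VERDICT (by name: the statement is the Claim_ definition above) =====
theorem find_best_truck_plt_spec : Claim_unchanged_find_best_truck_plt := by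
  intro count il iw ih kg ucs ex _ hnD
  show find_best_truck_plt count il iw ih kg ucs ex = find_best_truck_plt_alt count il iw ih kg ucs ex
  unfold find_best_truck_plt find_best_truck_plt_alt
  by_cases h1 : 1 ≤ count
  · exact pvGo_eq count il iw ih kg ucs ex (Or.inr h1) pvTrucks pvTrucks_dims
  · cases ex with
    | false => exact pvGo_eq count il iw ih kg ucs false (Or.inl rfl) pvTrucks pvTrucks_dims
    | true =>
      have hkg : 7500 < kg := by
        by_contra hk
        exact hnD ⟨by omega, rfl, by omega⟩
      have hheavy : ∀ t ∈ pvTrucks, t.2.2.2.2 < kg := by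
        intro t ht
        fin_cases ht <;> simp <;> omega
      obtain ⟨ha, hb⟩ := pvGo_heavy count il iw ih kg ucs true pvTrucks hheavy
      rw [ha, hb]

theorem find_best_truck_plt_changed : Claim_changed_find_best_truck_plt := by
  unfold Claim_changed_find_best_truck_plt; decide

theorem find_best_truck_plt_tight : Claim_exact_find_best_truck_plt := by
  intro count il iw ih kg ucs ex _ hD
  obtain ⟨hc, hex, hkg⟩ := hD
  subst hex
  unfold find_best_truck_plt find_best_truck_plt_alt
  rw [pvGoA_none count il iw ih kg ucs hc pvTrucks]
  intro heq
  have hB := pvGoB_some count il iw ih kg ucs hc pvTrucks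
    ⟨("15T", 760, 240, 240, 7500), by simp [pvTrucks], by simpa using hkg⟩
  rw [← heq] at hB
  simp at hB
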